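-- pv_equiv track=rewrite | github.com/JeongGod/Algo-study | JeongGod/16week/programmers/77885.py | find_zero_bit
-- ===== SOURCE A (Python) =====
-- def find_zero_bit(n):
--     idx = 0
--     while n > 0:
--         if n&1 == 0:
--             break
--         n >>= 1
--         idx += 1
--     return idx
-- ===== SOURCE B (Python) =====
-- def find_zero_bit(n):
--     # trailing-ones count: n ^ (n+1) is the contiguous low block of set bits plus the first zero bit
--     return (n ^ (n + 1)).bit_length() - 1 if n > 0 else 0
-- ===== Notes on version B (the rewrite author's own statement) =====
-- stated objective: idiomatic
-- what changed: Replaces the shift-and-count loop with the closed-form bit expression (n ^ (n+1)).bit_length() - 1 (guarded by n > 0, matching A's value 0 on non-positive input).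
import Mathlib
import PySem

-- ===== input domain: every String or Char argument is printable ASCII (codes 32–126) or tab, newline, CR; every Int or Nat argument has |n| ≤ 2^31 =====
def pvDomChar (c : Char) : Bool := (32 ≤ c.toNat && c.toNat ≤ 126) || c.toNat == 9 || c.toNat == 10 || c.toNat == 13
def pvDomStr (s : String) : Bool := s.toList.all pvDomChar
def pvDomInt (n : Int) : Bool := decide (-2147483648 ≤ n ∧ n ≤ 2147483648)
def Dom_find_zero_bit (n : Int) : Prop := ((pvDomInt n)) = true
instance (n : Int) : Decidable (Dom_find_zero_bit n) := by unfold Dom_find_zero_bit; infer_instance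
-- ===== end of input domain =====

-- B replaces A's shift-and-count loop by the closed-form bit expression
-- (n ^ (n+1)).bit_length() - 1 (idiomatic; guarded by n > 0 as in Source B).

-- ===== PORT A =====
-- the while loop of A; inside the guard n > 0, Python's 'n & 1' is 'n % 2' and
-- 'n >> 1' is 'n / 2' (Lean's Euclidean / and % on Int agree with Python's for
-- the positive divisor 2), so this is an exact step-for-step transcription.
def findZeroBitLoop (n : Int) (idx : Int) : Int :=
  if _h : 0 < n then
    if n % 2 == 0 then idx
    else findZeroBitLoop (n / 2) (idx + 1)
  else idx
termination_by n.toNat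
decreasing_by omega

def find_zero_bit (n : Int) : Int := findZeroBitLoop n 0

-- ===== PORT B =====
-- Python int.bit_length for a non-negative value (the only case reached here,
-- since n ^ (n+1) of a positive n is positive) is Nat.size of its magnitude.
def pyBitLength (x : Int) : Int := (Nat.size x.toNat : Int)

def find_zero_bit_alt (n : Int) : Int :=
  if 0 < n then pyBitLength (Int.xor n (n + 1)) - 1 else 0

-- ===== PRECONDITION & SPEC =====
def Spec_find_zero_bit (n : Int) (out : Int) : Prop := out = find_zero_bit_alt n
instance (n : Int) (out : Int) : Decidable (Spec_find_zero_bit n out) := by unfold Spec_find_zero_bit; infer_instance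

-- ===== CLAIM (what is proved, stated in full; the proofs are below) =====
def Claim_equal_find_zero_bit : Prop := ∀ (n : Int), Dom_find_zero_bit n → Spec_find_zero_bit n (find_zero_bit n)

-- ===== LEMMAS AND PROOFS =====

-- Nat-level facts about xor with the successor.
theorem xor_succ_of_even (k : Nat) : ((2 * k) ^^^ (2 * k + 1)) = 1 := by
  apply Nat.eq_of_testBit_eq
  intro i
  cases i with
  | zero =>
      simp [Nat.testBit_zero]
  | succ i =>
      rw [Nat.testBit_xor, Nat.testBit_succ, Nat.testBit_succ, Nat.testBit_succ]
      have h1 : (2 * k) / 2 = k := by omega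
      have h2 : (2 * k + 1) / 2 = k := by omega
      have h3 : (1 : Nat) / 2 = 0 := by omega
      simp [h1, h2, h3]

theorem xor_succ_of_odd (k : Nat) :
    ((2 * k + 1) ^^^ (2 * k + 2)) = 2 * (k ^^^ (k + 1)) + 1 := by
  apply Nat.eq_of_testBit_eq
  intro i
  cases i with
  | zero =>
      simp [Nat.testBit_zero]
      omega
  | succ i =>
      rw [Nat.testBit_xor, Nat.testBit_succ, Nat.testBit_succ, Nat.testBit_succ]
      have h1 : (2 * k + 1) / 2 = k := by omega
      have h2 : (2 * k + 2) / 2 = k + 1 := by omega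
      have h3 : (2 * (k ^^^ (k + 1)) + 1) / 2 = k ^^^ (k + 1) := by omega
      rw [h1, h2, h3, Nat.testBit_xor]

-- trailing-ones count on Nat, the value A's loop accumulates.
def trailOnes (n : Nat) : Nat :=
  if n = 0 then 0
  else if n % 2 = 0 then 0
  else trailOnes (n / 2) + 1
termination_by n
decreasing_by omega

theorem size_bit1 (x : Nat) : Nat.size (2 * x + 1) = Nat.size x + 1 := by
  have h : (2 * x + 1) = Nat.bit true x := by simp [Nat.bit]
  rw [h, Nat.size_bit]
  simp [Nat.bit]

theorem size_xor_succ (N : Nat) (h : 0 < N) :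
    Nat.size (N ^^^ (N + 1)) = trailOnes N + 1 := by
  induction N using Nat.strong_induction_on with
  | _ N ih =>
    rcases Nat.even_or_odd N with ⟨k, hk⟩ | ⟨k, hk⟩
    · have hk2 : N = 2 * k := by omega
      subst hk2
      rw [xor_succ_of_even k]
      have hne : ¬ (2 * k = 0) := by omega
      have hmod : (2 * k) % 2 = 0 := by omega
      have h0 : trailOnes (2 * k) = 0 := by
        rw [trailOnes, if_neg hne, if_pos hmod]
      rw [h0]
      decide
    · have hk2 : N = 2 * k + 1 := by omega
      subst hk2
      have hx : ((2 * k + 1) ^^^ (2 * k + 1 + 1)) = 2 * (k ^^^ (k + 1)) + 1 := by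
        have := xor_succ_of_odd k
        omega
      rw [hx, size_bit1]
      have ht : trailOnes (2 * k + 1) = trailOnes k + 1 := by
        rw [trailOnes]
        have hne : ¬ (2 * k + 1 = 0) := by omega
        have hmod : ¬ ((2 * k + 1) % 2 = 0) := by omega
        have hdiv : (2 * k + 1) / 2 = k := by omega
        rw [if_neg hne, if_neg hmod, hdiv]
      rw [ht]
      rcases Nat.eq_zero_or_pos k with hk0 | hk0
      · subst hk0
        rw [trailOnes]
        decide
      · rw [ih k (by omega) hk0]

-- the loop computes idx + trailOnes n for non-negative n.
theorem loop_eq (N : Nat) (idx : Int) :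
    findZeroBitLoop (N : Int) idx = idx + (trailOnes N : Int) := by
  induction N using Nat.strong_induction_on generalizing idx with
  | _ N ih =>
    unfold findZeroBitLoop
    rcases Nat.eq_zero_or_pos N with h0 | hpos
    · subst h0
      rw [trailOnes]
      simp
    · have hposI : (0 : Int) < (N : Int) := by exact_mod_cast hpos
      rw [dif_pos hposI]
      by_cases hpar : N % 2 = 0
      · have hb : ((N : Int) % 2 == 0) = true := by
          simp
          omega
        have h0 : trailOnes N = 0 := by
          rw [trailOnes, if_neg (by omega : ¬ N = 0), if_pos hpar]
        rw [if_pos hb, h0]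
        simp
      · have hb : ((N : Int) % 2 == 0) = false := by
          simp
          omega
        rw [if_neg (by simp [hb])]
        have hdiv : (N : Int) / 2 = ((N / 2 : Nat) : Int) := by omega
        rw [hdiv, ih (N / 2) (by omega)]
        have ht : trailOnes N = trailOnes (N / 2) + 1 := by
          rw [trailOnes, if_neg (by omega : ¬ N = 0), if_neg hpar]
        rw [ht]
        push_cast
        ring

-- ===== VERDICT (by name: the statement is the Claim_ definition above) =====
theorem find_zero_bit_spec : Claim_equal_find_zero_bit := by
  intro n _
  unfold Spec_find_zero_bit find_zero_bit find_zero_bit_alt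
  by_cases h : 0 < n
  · rw [if_pos h]
    obtain ⟨N, rfl⟩ : ∃ N : Nat, n = (N : Int) := ⟨n.toNat, by omega⟩
    have hN : 0 < N := by exact_mod_cast h
    rw [loop_eq N 0]
    have hcast : Int.xor (N : Int) ((N : Int) + 1) = ((N ^^^ (N + 1) : Nat) : Int) := by
      norm_cast
    rw [hcast]
    unfold pyBitLength
    rw [Int.toNat_natCast, size_xor_succ N hN]
    push_cast
    ring
  · rw [if_neg h]
    unfold findZeroBitLoop
    rw [dif_neg h]
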